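-- pv_equiv track=rewrite | github.com/VictorCosme/Labiracodigos | project-euler/6-SumSquareDifference.py | weird_sum
-- ===== SOURCE A (Python) =====
-- def weird_sum(n):
-- 	a = 0
-- 	b = 1
--
-- 	sum = 0
-- 	while a <= n:
-- 		sum += a**2 + b**2
-- 		a += 1
-- 		b += 1
--
-- 	return sum
-- ===== SOURCE B (Python) =====
-- def weird_sum(n):
--     # Closed form: sum_{a=0}^{n} (a**2 + (a+1)**2) = (n+1)*(2*n*n + 4*n + 3)//3
--     if n < 0:
--         return 0
--     return (n + 1) * (2 * n * n + 4 * n + 3) // 3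
-- ===== Notes on version B (the rewrite author's own statement) =====
-- stated objective: faster
-- what changed: Replaced the O(n) accumulation loop over a=0..n with the exact closed-form formula (n+1)(2n^2+4n+3)/3 (and 0 for n<0).
import Mathlib
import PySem

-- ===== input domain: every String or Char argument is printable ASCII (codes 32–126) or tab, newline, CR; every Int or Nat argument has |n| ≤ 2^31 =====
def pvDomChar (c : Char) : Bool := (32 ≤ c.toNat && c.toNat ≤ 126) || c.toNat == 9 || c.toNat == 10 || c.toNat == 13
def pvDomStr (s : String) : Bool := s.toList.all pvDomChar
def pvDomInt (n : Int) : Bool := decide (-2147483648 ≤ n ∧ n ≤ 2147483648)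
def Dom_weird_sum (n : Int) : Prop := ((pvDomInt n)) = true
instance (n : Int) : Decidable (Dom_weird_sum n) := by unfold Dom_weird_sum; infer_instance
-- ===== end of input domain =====

-- B replaces A's O(n) while-loop accumulation with the exact closed-form formula (n+1)(2n^2+4n+3)/3.


-- ===== PORT A =====
-- while a <= n: sum += a**2 + b**2; a += 1; b += 1
def weirdLoop (n a b sum : Int) : Int :=
  if _h : a ≤ n then weirdLoop n (a + 1) (b + 1) (sum + (a ^ 2 + b ^ 2)) else sum
termination_by (n + 1 - a).toNat
decreasing_by omega

def weird_sum (n : Int) : Int := weirdLoop n 0 1 0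

-- ===== PORT B =====
def weird_sum_alt (n : Int) : Int :=
  if n < 0 then 0 else (n + 1) * (2 * n * n + 4 * n + 3) / 3

-- ===== PRECONDITION & SPEC =====
def Spec_weird_sum (n : Int) (out : Int) : Prop := out = weird_sum_alt n
instance (n : Int) (out : Int) : Decidable (Spec_weird_sum n out) := by unfold Spec_weird_sum; infer_instance

-- ===== CLAIM (what is proved, stated in full; the proofs are below) =====
def Claim_equal_weird_sum : Prop := ∀ (n : Int), Dom_weird_sum n → Spec_weird_sum n (weird_sum n)

-- ===== LEMMAS AND PROOFS =====

-- 3 * (partial sums from a upward), as a polynomial: Tp m = 3 * Σ_{k=0}^{m} (k² + (k+1)²)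
def Tp (m : Int) : Int := (m + 1) * (2 * m ^ 2 + 4 * m + 3)

theorem weirdLoop_three (n a s : Int) :
    3 * weirdLoop n a (a + 1) s = 3 * s + (if a ≤ n then Tp n - Tp (a - 1) else 0) := by
  rw [weirdLoop]
  split_ifs with h
  · have ih := weirdLoop_three n (a + 1) (s + (a ^ 2 + (a + 1) ^ 2))
    rw [ih]
    by_cases h2 : a + 1 ≤ n
    · simp only [if_pos h2, Tp]; ring
    · have : a = n := by omega
      subst this
      simp only [if_neg h2, Tp]; ring
  · simp
termination_by (n + 1 - a).toNat
decreasing_by omega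

-- ===== VERDICT (by name: the statement is the Claim_ definition above) =====
theorem weird_sum_spec : Claim_equal_weird_sum := by
  intro n _
  unfold Spec_weird_sum weird_sum weird_sum_alt
  have h := weirdLoop_three n 0 0
  norm_num at h
  by_cases hn : n < 0
  · rw [if_pos hn]
    rw [if_neg (by omega)] at h
    omega
  · rw [if_neg hn]
    rw [if_pos (by omega : (0:Int) ≤ n)] at h
    have hTp : Tp (-1) = 0 := by simp [Tp]
    rw [hTp, sub_zero] at h
    have : (n + 1) * (2 * n * n + 4 * n + 3) = 3 * weirdLoop n 0 1 0 := by
      rw [h]; unfold Tp; ring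
    rw [this, Int.mul_ediv_cancel_left _ (by norm_num)]
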